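-- pv_equiv track=rewrite | github.com/wlsgudjh925/backjoon_python_practice | p1003.py | count_fi
-- ===== SOURCE A (Python) =====
-- def count_fi(n):
--     zero = [1, 0, 1]
--     one = [0, 1, 1]
--
--     if n < 3: #0, 1, 2일 경우는 이미 만들어져 있으므로
--         return
--
--     for i in range(3, n+1):
--         zero.append(zero[-1]+zero[-2])
--         one.append(one[-1]+one[-2])
--
--     return zero, one
-- ===== SOURCE B (Python) =====
-- def count_fi(n):
--     if n < 3:
--         return
--     f = [1, 0]
--     while len(f) < n + 2:
--         f.append(f[-1] + f[-2])
--     return f[:-1], f[1:]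
-- ===== Notes on version B (the rewrite author's own statement) =====
-- stated objective: simpler
-- what changed: Instead of growing two parallel lists with the recurrence, B builds one shared Fibonacci list f of length n+2 (while len(f) < n+2: append f[-1]+f[-2], starting from [1,0]) and returns the two answers as its independent slice copies f[:-1] and f[1:], exploiting the identity one[i] == zero[i+1]; the early None return for n < 3 is unchanged.
import Mathlib
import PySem

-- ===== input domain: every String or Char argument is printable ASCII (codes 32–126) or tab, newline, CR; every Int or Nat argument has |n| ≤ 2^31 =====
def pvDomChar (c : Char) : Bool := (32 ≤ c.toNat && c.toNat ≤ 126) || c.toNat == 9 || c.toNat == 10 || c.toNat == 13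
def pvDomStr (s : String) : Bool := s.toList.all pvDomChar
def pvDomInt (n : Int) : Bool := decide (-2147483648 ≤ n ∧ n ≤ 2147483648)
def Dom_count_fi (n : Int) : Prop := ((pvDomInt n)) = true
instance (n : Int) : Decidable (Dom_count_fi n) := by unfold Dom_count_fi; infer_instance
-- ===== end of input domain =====

-- B builds ONE shared Fibonacci list f = [1, 0, 1, 1, 2, ...] of length n+2 and returns the two
-- answers as its slices f[:-1] and f[1:], using one[i] == zero[i+1]; A grows two parallel lists
-- (objective: simpler).

-- ===== PORT A =====
-- A's loop body: append zero[-1]+zero[-2] and one[-1]+one[-2].  The lists always hold ≥ 3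
-- elements, so pyGetD with default 0 is exact (Python's zero[-1]/zero[-2] never raise here).
def stepA (s : List Int × List Int) : List Int × List Int :=
  (s.1 ++ [PySem.List.pyGetD s.1 (-1) 0 + PySem.List.pyGetD s.1 (-2) 0],
   s.2 ++ [PySem.List.pyGetD s.2 (-1) 0 + PySem.List.pyGetD s.2 (-2) 0])

def count_fi (n : Int) : Option (List Int × List Int) :=
  if n < 3 then none
  else
    let s := (PySem.List.pyRange 3 (n + 1) 1).foldl (fun s _ => stepA s) ([1, 0, 1], [0, 1, 1])
    some s

-- ===== PORT B =====
-- Source B's while loop: while len(f) < n + 2: f.append(f[-1] + f[-2]).  Fuel = the number of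
-- iterations, (n + 2) - 2; f is always nonempty so pyGetD with default 0 is exact.
def growB (f : List Int) : Nat → List Int
  | 0 => f
  | k + 1 => growB (f ++ [PySem.List.pyGetD f (-1) 0 + PySem.List.pyGetD f (-2) 0]) k

def count_fi_alt (n : Int) : Option (List Int × List Int) :=
  if n < 3 then none
  else
    let f := growB [1, 0] (n + 2 - 2).toNat
    some (PySem.List.slice f none (some (-1)), PySem.List.slice f (some 1) none)

-- ===== PRECONDITION & SPEC =====
def Spec_count_fi (n : Int) (out : Option (List Int × List Int)) : Prop := out = count_fi_alt n
instance (n : Int) (out : Option (List Int × List Int)) : Decidable (Spec_count_fi n out) := by unfold Spec_count_fi; infer_instance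

-- ===== CLAIM (what is proved, stated in full; the proofs are below) =====
def Claim_equal_count_fi : Prop := ∀ (n : Int), Dom_count_fi n → Spec_count_fi n (count_fi n)

-- ===== LEMMAS AND PROOFS =====

-- the "zeros" sequence 1, 0, 1, 1, 2, 3, …; the "ones" sequence is its shift
def fz : Nat → Int
  | 0 => 1
  | 1 => 0
  | (k + 2) => fz k + fz (k + 1)

def fo (k : Nat) : Int := fz (k + 1)

lemma append_sum_map {f : Nat → Int} (hrec : ∀ k, f (k + 2) = f k + f (k + 1))
    (j : Nat) (hj : 2 ≤ j) :
    (List.range j).map f ++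
      [PySem.List.pyGetD ((List.range j).map f) (-1) 0 +
       PySem.List.pyGetD ((List.range j).map f) (-2) 0] = (List.range (j + 1)).map f := by
  have hlen : ((List.range j).map f).length = j := by simp
  rw [PySem.List.pyGetD_neg_ofNat _ 1 0 (by omega) (by omega),
      PySem.List.pyGetD_neg_ofNat _ 2 0 (by omega) (by omega)]
  obtain ⟨m, rfl⟩ : ∃ m, j = m + 2 := ⟨j - 2, by omega⟩
  simp [List.range_succ, hrec]
  omega

lemma stepA_iter (m : Nat) :
    stepA^[m] ((List.range 3).map fz, (List.range 3).map fo) =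
      ((List.range (3 + m)).map fz, (List.range (3 + m)).map fo) := by
  induction m with
  | zero => simp
  | succ m ih =>
      rw [Function.iterate_succ_apply', ih]
      unfold stepA
      have hz := append_sum_map (f := fz) (fun k => rfl) (3 + m) (by omega)
      have ho := append_sum_map (f := fo) (fun k => by simp [fo, fz]) (3 + m) (by omega)
      simp only [hz, ho]
      have : 3 + m + 1 = 3 + (m + 1) := by omega
      rw [this]

lemma growB_map (m j : Nat) (hj : 2 ≤ j) :
    growB ((List.range j).map fz) m = (List.range (j + m)).map fz := by
  induction m generalizing j with
  | zero => simp [growB]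
  | succ m ih =>
      rw [growB, append_sum_map (f := fz) (fun k => rfl) j hj, ih (j + 1) (by omega)]
      have : j + 1 + m = j + (m + 1) := by omega
      rw [this]

-- literal initial states are the maps over range 3 / range 2
lemma init_A : (([1, 0, 1], [0, 1, 1]) : List Int × List Int)
    = ((List.range 3).map fz, (List.range 3).map fo) := by decide

lemma init_B : ([1, 0] : List Int) = (List.range 2).map fz := by decide

lemma dropLast_range_map (m : Nat) :
    ((List.range (m + 1)).map fz).dropLast = (List.range m).map fz := by
  rw [List.range_succ, List.map_append]
  simp

lemma tail_range_map (m : Nat) :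
    ((List.range (m + 1)).map fz).tail = (List.range m).map fo := by
  rw [List.range_succ_eq_map]
  simp [fo, Function.comp, Nat.succ_eq_add_one]

theorem count_fi_spec_aux (n : Int) : count_fi n = count_fi_alt n := by
  unfold count_fi count_fi_alt
  by_cases h : n < 3
  · simp [h]
  · simp only [h, if_false]
    rw [List.foldl_const stepA, PySem.List.length_pyRange_one, init_A, stepA_iter]
    rw [init_B, growB_map _ 2 (by omega)]
    rw [PySem.List.slice_to_neg_one, PySem.List.slice_from_one]
    have e2 : 2 + (n + 2 - 2).toNat = (3 + (n + 1 - 3).toNat) + 1 := by omega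
    rw [e2, dropLast_range_map, tail_range_map]

-- ===== VERDICT (by name: the statement is the Claim_ definition above) =====
theorem count_fi_spec : Claim_equal_count_fi := by
  intro n _
  show count_fi n = count_fi_alt n
  exact count_fi_spec_aux n
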